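-- pv_equiv track=rewrite | github.com/Wayne0758/leetcode | Wayne0758/leetcode/problems/bag_of_tokens/solution.py | bagOfTokensScore
-- ===== SOURCE A (Python) =====
-- from typing import List
--
-- def bagOfTokensScore(tokens: List[int], power: int) -> int:
--     tokens.sort()
--     score=0
--     scoretemp=0
--     while tokens:
--         if tokens[0]>power:
--             if score==0:
--                 return 0
--             else:
--                 scoretemp=score
--                 score-=1
--                 power+=tokens.pop(-1)
--         else:
--             power-=tokens.pop(0)
--             score+=1
--     return max(score,scoretemp)
-- ===== SOURCE B (Python) =====
-- from typing import List
--
-- def bagOfTokensScore(tokens: List[int], power: int) -> int: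
--     # Two pointers over a sorted copy; no O(n) pop(0).  Return value only:
--     # unlike A, B does not mutate the caller's list.
--     toks = sorted(tokens)
--     i, j = 0, len(toks) - 1
--     score = best = 0
--     while i <= j:
--         if toks[i] <= power:
--             power -= toks[i]
--             i += 1
--             score += 1
--             if score > best:
--                 best = score
--         elif score > 0:
--             power += toks[j]
--             j -= 1
--             score -= 1
--         else:
--             break
--     return best
-- ===== Notes on version B (the rewrite author's own statement) =====
-- stated objective: faster
-- what changed: Replaces A's destructive loop (pop(0)/pop(-1) on the list, plus a scoretemp/max-at-end bookkeeping) with a two-pointer scan over a sorted copy that tracks the running best score.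
import Mathlib
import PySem

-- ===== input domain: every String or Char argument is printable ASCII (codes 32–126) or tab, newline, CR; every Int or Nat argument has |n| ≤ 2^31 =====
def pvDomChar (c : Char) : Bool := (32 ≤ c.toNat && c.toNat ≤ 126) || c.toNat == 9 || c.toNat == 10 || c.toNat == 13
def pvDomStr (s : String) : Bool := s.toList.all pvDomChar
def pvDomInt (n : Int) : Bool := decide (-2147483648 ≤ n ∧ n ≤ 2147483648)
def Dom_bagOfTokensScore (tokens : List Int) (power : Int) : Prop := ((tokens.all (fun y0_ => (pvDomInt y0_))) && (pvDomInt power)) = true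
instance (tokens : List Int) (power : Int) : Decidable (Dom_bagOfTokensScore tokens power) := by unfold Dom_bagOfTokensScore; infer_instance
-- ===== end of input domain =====

-- B replaces A's destructive pop(0)/pop(-1) loop with a two-pointer scan over a
-- sorted copy, tracking the running best score: O(n log n) instead of O(n^2).
-- A sorts and empties the caller's list in place; B leaves it untouched — the
-- equivalence proved here is about the return value only.

-- ===== PORT A =====
-- A's while-loop: state = (remaining tokens, power, score, scoretemp); each
-- iteration pops one element, so the list length is the measure.
-- tokens.pop(0) on the matched t :: ts yields t, leaving ts (exact);
-- tokens.pop(-1) on a nonempty list yields its last element, leaving dropLast (exact).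
def pvALoop (l : List Int) (power score scoretemp : Int) : Int :=
  match h : l with
  | [] => max score scoretemp
  | t :: ts =>
    if t > power then
      if score = 0 then 0
      else pvALoop (t :: ts).dropLast (power + (t :: ts).getLast (by simp))
             (score - 1) score
    else pvALoop ts (power - t) (score + 1) scoretemp
termination_by l.length
decreasing_by
  · simp
  · simp

def bagOfTokensScore (tokens : List Int) (power : Int) : Int :=
  pvALoop (PySem.List.sorted tokens (fun x => x) false) power 0 0

-- ===== PORT B =====
-- Source B's while-loop over indices i, j; measure = (j + 1 - i).toNat.
-- toks[i] / toks[j] are PySem.List.pyGet?; the 'none' arms are unreachable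
-- (0 ≤ i ≤ j < len throughout) and only make the recursion total.
def pvBLoop (toks : List Int) (i j power score best : Int) : Int :=
  if _h : i ≤ j then
    match PySem.List.pyGet? toks i, PySem.List.pyGet? toks j with
    | some ti, some tj =>
      if ti ≤ power then
        pvBLoop toks (i + 1) j (power - ti) (score + 1)
          (if score + 1 > best then score + 1 else best)
      else if score > 0 then
        pvBLoop toks i (j - 1) (power + tj) (score - 1) best
      else best
    | _, _ => best
  else best
termination_by (j + 1 - i).toNat
decreasing_by
  · omega
  · omega

def bagOfTokensScore_alt (tokens : List Int) (power : Int) : Int :=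
  pvBLoop (PySem.List.sorted tokens (fun x => x) false) 0
    ((PySem.List.sorted tokens (fun x => x) false).length - 1) power 0 0

-- ===== PRECONDITION & SPEC =====
def Spec_bagOfTokensScore (tokens : List Int) (power : Int) (out : Int) : Prop := out = bagOfTokensScore_alt tokens power
instance (tokens : List Int) (power : Int) (out : Int) : Decidable (Spec_bagOfTokensScore tokens power out) := by unfold Spec_bagOfTokensScore; infer_instance

-- ===== CLAIM (what is proved, stated in full; the proofs are below) =====
def Claim_equal_bagOfTokensScore : Prop := ∀ (tokens : List Int) (power : Int), Dom_bagOfTokensScore tokens power → Spec_bagOfTokensScore tokens power (bagOfTokensScore tokens power)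

-- ===== LEMMAS AND PROOFS =====

-- the contiguous segment toks[i..j] that pvALoop is working on
def pvSeg (toks : List Int) (i j : Int) : List Int :=
  (toks.drop i.toNat).take (j + 1 - i).toNat

lemma pvSeg_nil (toks : List Int) (i j : Int) (h : j < i) : pvSeg toks i j = [] := by
  simp [pvSeg]; omega

lemma pvSeg_cons (toks : List Int) (i j : Int) (h0 : 0 ≤ i) (hij : i ≤ j)
    (hj : j < (toks.length : Int)) :
    pvSeg toks i j = toks[i.toNat]'(by omega) :: pvSeg toks (i + 1) j := by
  have hi : i.toNat < toks.length := by omega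
  unfold pvSeg
  rw [List.drop_eq_getElem_cons hi]
  have h1 : (j + 1 - i).toNat = ((j + 1 - (i + 1)).toNat) + 1 := by omega
  have h2 : (i + 1).toNat = i.toNat + 1 := by omega
  rw [h1, h2, List.take_succ_cons]

lemma pvSeg_snoc (toks : List Int) (i j : Int) (h0 : 0 ≤ i) (hij : i ≤ j)
    (hj : j < (toks.length : Int)) :
    pvSeg toks i j = pvSeg toks i (j - 1) ++ [toks[j.toNat]'(by omega)] := by
  unfold pvSeg
  have h1 : (j + 1 - i).toNat = ((j - i).toNat) + 1 := by omega
  rw [h1, List.take_add_one]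
  have h2 : (toks.drop i.toNat)[(j - i).toNat]? = some (toks[j.toNat]'(by omega)) := by
    rw [List.getElem?_drop, List.getElem?_eq_getElem (by omega)]
    congr 1
    congr 1
    omega
  rw [h2]
  have h3 : (j - 1 + 1 - i).toNat = (j - i).toNat := by omega
  rw [h3]
  rfl

-- one unfolding of pvALoop on a nonempty list, phrased through head?/getLast?
lemma pvALoop_step (l : List Int) (power score st hd lst : Int)
    (h1 : l.head? = some hd) (h2 : l.getLast? = some lst) :
    pvALoop l power score st =
      if hd > power then
        if score = 0 then 0
        else pvALoop l.dropLast (power + lst) (score - 1) score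
      else pvALoop l.tail (power - hd) (score + 1) st := by
  cases l with
  | nil => simp at h1
  | cons t ts =>
    simp only [List.head?_cons, Option.some.injEq] at h1
    have h2' : (t :: ts).getLast (by simp) = lst := by
      rw [List.getLast?_eq_some_getLast (by simp)] at h2
      simpa using h2
    subst h1
    rw [pvALoop, h2']
    rfl

-- the invariant-carrying bridge between the two loops
lemma pvLoop_bridge (toks : List Int)
    (hs : ∀ p q : Nat, (hpq : p ≤ q) → (hq : q < toks.length) → toks[p]'(by omega) ≤ toks[q]) :
    ∀ n (i j power score st best : Int),
    (j + 1 - i).toNat = n → 0 ≤ i → j < (toks.length : Int) →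
    best = max score st → 0 ≤ score → 0 ≤ st →
    (st ≤ score ∨ (score + 1 = st ∧ (i ≤ j → PySem.List.pyGetD toks i 0 ≤ power))) →
    (0 < score → i ≤ j → (PySem.List.pyGetD toks i 0 ≤ power + PySem.List.pyGetD toks j 0 ∨ PySem.List.pyGetD toks i 0 ≤ power)) →
    pvALoop (pvSeg toks i j) power score st = pvBLoop toks i j power score best := by
  intro n
  induction n with
  | zero =>
    intro i j power score st best hn h0 hj hbest hsc hst _ _
    have hji : j < i := by omega
    rw [pvSeg_nil _ _ _ hji, pvALoop, pvBLoop, dif_neg (by omega)]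
    omega
  | succ n ih =>
    intro i j power score st best hn h0 hj hbest hsc hst hI3 hI4
    have hij : i ≤ j := by omega
    have hi : i.toNat < toks.length := by omega
    have hjn : j.toNat < toks.length := by omega
    have hgi : PySem.List.pyGet? toks i = some (toks[i.toNat]'hi) :=
      PySem.List.pyGet?_eq_some_getElem _ (by omega) (by omega)
    have hgj : PySem.List.pyGet? toks j = some (toks[j.toNat]'hjn) :=
      PySem.List.pyGet?_eq_some_getElem _ (by omega) (by omega)
    have hdi : PySem.List.pyGetD toks i 0 = toks[i.toNat]'hi :=
      PySem.List.pyGetD_eq_getElem _ _ (by omega) (by omega)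
    have hdj : PySem.List.pyGetD toks j 0 = toks[j.toNat]'hjn :=
      PySem.List.pyGetD_eq_getElem _ _ (by omega) (by omega)
    have hseg := pvSeg_cons toks i j h0 hij hj
    have hsnoc := pvSeg_snoc toks i j h0 hij hj
    have hhd : (pvSeg toks i j).head? = some (toks[i.toNat]'hi) := by
      rw [hseg]; rfl
    have hlst : (pvSeg toks i j).getLast? = some (toks[j.toNat]'hjn) := by
      rw [hsnoc]; exact List.getLast?_concat
    have htl : (pvSeg toks i j).tail = pvSeg toks (i + 1) j := by
      rw [hseg]; rfl
    have hdl : (pvSeg toks i j).dropLast = pvSeg toks i (j - 1) := by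
      rw [hsnoc]; exact List.dropLast_concat
    rw [pvALoop_step _ _ _ _ _ _ hhd hlst, htl, hdl,
        pvBLoop, dif_pos hij, hgi, hgj]
    dsimp only
    by_cases hbuy : toks[i.toNat]'hi ≤ power
    · -- buy: both loops take the front element
      rw [if_neg (by omega), if_pos hbuy]
      refine ih (i + 1) j (power - toks[i.toNat]'hi) (score + 1) st _
        (by omega) (by omega) hj ?_ (by omega) hst ?_ ?_
      · split_ifs <;> omega
      · left; omega
      · intro _ hij'
        left
        have hd1 : PySem.List.pyGetD toks (i + 1) 0 = toks[(i + 1).toNat]'(by omega) :=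
          PySem.List.pyGetD_eq_getElem _ _ (by omega) (by omega)
        have h2 := hs (i + 1).toNat j.toNat (by omega) (by omega)
        rw [hd1, hdj]
        omega
    · -- front element too expensive
      rw [if_pos (by omega), if_neg hbuy]
      by_cases hz : score = 0
      · -- A returns 0; B breaks with best
        rw [if_pos hz, if_neg (by omega)]
        rcases hI3 with h | ⟨h1, h2⟩
        · omega
        · exact absurd (h2 hij) (by rw [hdi]; omega)
      · -- sell: both loops drop the back element
        rw [if_neg hz, if_pos (by omega)]
        have hI4' := hI4 (by omega) hij
        rw [hdi, hdj] at hI4'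
        have hback : toks[i.toNat]'hi ≤ power + toks[j.toNat]'hjn := by
          rcases hI4' with h | h
          · exact h
          · omega
        have hbb : best = score := by
          rcases hI3 with h | ⟨h1, h2⟩
          · omega
          · exact absurd (h2 hij) (by rw [hdi]; omega)
        refine ih i (j - 1) (power + toks[j.toNat]'hjn) (score - 1) score _
          (by omega) h0 (by omega) (by omega) (by omega) (by omega) ?_ ?_
        · right
          refine ⟨by omega, fun _ => ?_⟩
          rw [hdi]; exact hback
        · intro _ _
          right
          rw [hdi]; exact hback

-- ===== VERDICT (by name: the statement is the Claim_ definition above) =====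
theorem bagOfTokensScore_spec : Claim_equal_bagOfTokensScore := by
  intro tokens power _
  unfold Spec_bagOfTokensScore bagOfTokensScore bagOfTokensScore_alt
  set toks := PySem.List.sorted tokens (fun x => x) false with htoks
  have hs : ∀ p q : Nat, (hpq : p ≤ q) → (hq : q < toks.length) →
      toks[p]'(by omega) ≤ toks[q] := by
    intro p q hpq hq
    exact PySem.List.sorted_id_getElem_mono tokens hpq hq
  have hseg : pvSeg toks 0 ((toks.length : Int) - 1) = toks := by
    unfold pvSeg
    have h1 : ((toks.length : Int) - 1 + 1 - 0).toNat = toks.length := by omega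
    rw [h1]
    simp
  have := pvLoop_bridge toks hs (((toks.length : Int) - 1) + 1 - 0).toNat
    0 ((toks.length : Int) - 1) power 0 0 0 rfl (by omega) (by omega)
    (by simp) (by omega) (by omega) (by left; omega) (by omega)
  rw [hseg] at this
  exact this
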